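-- pv_equiv track=rewrite | github.com/guardkit/guardkit | guardkit/commands/feature_spec.py | _generate_summary_md
-- ===== SOURCE A (Python) =====
-- def _count_scenarios(feature_content: str) -> int:
--     """Count Scenario: and Scenario Outline: lines.
--
--     Args:
--         feature_content: Raw Gherkin feature content string.
--
--     Returns:
--         Integer count of scenario declarations.
--     """
--     count = 0
--     for line in feature_content.splitlines():
--         stripped = line.strip()
--         if stripped.startswith("Scenario:") or stripped.startswith("Scenario Outline:"):
--             count += 1
--     return count
--
-- def _parse_scenarios(feature_content: str) -> list[str]:
--     """Parse feature content into individual scenario blocks.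
--
--     Each block starts at a Scenario: or Scenario Outline: line and
--     extends to the next such line (or end of content).
--
--     Args:
--         feature_content: Raw Gherkin feature content string.
--
--     Returns:
--         List of scenario block strings (each includes its Scenario: header).
--     """
--     scenarios = []
--     current: list[str] = []
--     in_scenario = False
--
--     for line in feature_content.splitlines():
--         stripped = line.strip()
--         if stripped.startswith("Scenario:") or stripped.startswith("Scenario Outline:"):
--             if current and in_scenario:
--                 scenarios.append("\n".join(current))
--             current = [line]
--             in_scenario = True
--         elif in_scenario:
--             current.append(line)
--
--     if current and in_scenario:
--         scenarios.append("\n".join(current))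
--
--     return scenarios
--
-- def _generate_summary_md(
--     feature_name: str,
--     feature_content: str,
--     assumptions: list[dict],
--     stack: dict,
-- ) -> str:
--     """Generate summary markdown file content.
--
--     Args:
--         feature_name: Kebab-case feature name.
--         feature_content: Raw Gherkin feature content.
--         assumptions: List of assumption dicts.
--         stack: Stack dict from detect_stack().
--
--     Returns:
--         Markdown string for the summary file.
--     """
--     scenario_count = _count_scenarios(feature_content)
--     lines = [
--         f"# Feature Spec Summary: {feature_name}",
--         "",
--         f"**Stack:** {stack.get('stack', 'generic')}",
--         f"**BDD Runner:** {stack.get('bdd_runner') or 'N/A'}",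
--         f"**Scenarios:** {scenario_count}",
--         f"**Assumptions:** {len(assumptions)}",
--         "",
--         "## Scenarios",
--         "",
--     ]
--     for scenario_text in _parse_scenarios(feature_content):
--         first_line = scenario_text.strip().splitlines()[0].strip()
--         lines.append(f"- {first_line}")
--
--     if assumptions:
--         lines.extend(["", "## Assumptions", ""])
--         for a in assumptions:
--             text = a.get("text") or a.get("description", "")
--             lines.append(f"- **{a.get('id', '?')}**: {text}")
--
--     lines.append("")
--     return "\n".join(lines)
-- ===== SOURCE B (Python) =====
-- def _generate_summary_md(
--     feature_name: str,
--     feature_content: str,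
--     assumptions: list[dict],
--     stack: dict,
-- ) -> str:
--     """Generate summary markdown file content (single-pass over the feature lines)."""
--     titles: list[str] = []
--     for line in feature_content.splitlines():
--         stripped = line.strip()
--         if stripped.startswith("Scenario:") or stripped.startswith("Scenario Outline:"):
--             titles.append(stripped)
--
--     parts = [
--         f"# Feature Spec Summary: {feature_name}",
--         "",
--         f"**Stack:** {stack.get('stack', 'generic')}",
--         f"**BDD Runner:** {stack.get('bdd_runner') or 'N/A'}",
--         f"**Scenarios:** {len(titles)}",
--         f"**Assumptions:** {len(assumptions)}",
--         "",
--         "## Scenarios",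
--         "",
--         *(f"- {t}" for t in titles),
--     ]
--     if assumptions:
--         parts += ["", "## Assumptions", ""]
--         parts += [
--             f"- **{a.get('id', '?')}**: {a.get('text') or a.get('description', '')}"
--             for a in assumptions
--         ]
--     parts.append("")
--     return "\n".join(parts)
-- ===== Notes on version B (the rewrite author's own statement) =====
-- stated objective: simpler
-- what changed: A's two extra scans (a counting pass and a state machine that accumulates whole scenario blocks only to re-split each block and keep its first line) are replaced by one pass over splitlines() that directly collects the stripped 'Scenario:'/'Scenario Outline:' header lines; the count is the length of that list and the bullets are built from it.
import Mathlib
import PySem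

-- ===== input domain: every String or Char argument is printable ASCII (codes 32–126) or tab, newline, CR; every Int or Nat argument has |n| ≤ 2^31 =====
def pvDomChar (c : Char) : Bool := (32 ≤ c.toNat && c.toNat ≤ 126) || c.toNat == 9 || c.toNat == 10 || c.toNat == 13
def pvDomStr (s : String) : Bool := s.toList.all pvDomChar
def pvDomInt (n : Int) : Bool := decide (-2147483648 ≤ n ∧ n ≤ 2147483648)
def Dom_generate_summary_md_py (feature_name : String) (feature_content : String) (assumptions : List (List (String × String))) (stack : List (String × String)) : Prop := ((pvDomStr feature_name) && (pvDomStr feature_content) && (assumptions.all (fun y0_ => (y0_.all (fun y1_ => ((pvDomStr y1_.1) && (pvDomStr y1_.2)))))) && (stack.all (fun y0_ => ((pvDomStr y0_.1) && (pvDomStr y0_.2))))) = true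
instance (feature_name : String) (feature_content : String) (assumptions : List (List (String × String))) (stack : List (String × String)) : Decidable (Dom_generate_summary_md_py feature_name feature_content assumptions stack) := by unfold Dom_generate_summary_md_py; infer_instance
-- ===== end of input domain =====

-- B replaces A's two extra scans (a counting pass and a block-accumulating state machine whose
-- blocks are immediately reduced back to their first lines) by ONE pass that collects the
-- stripped scenario headers; objective: simpler.

-- ===== PORT A =====
-- _count_scenarios
def pyCountScenarios (feature_content : String) : Int :=
  (PySem.Str.splitlines feature_content).foldl
    (fun count line =>
      let stripped := PySem.Str.strip line
      if PySem.Str.startswith stripped "Scenario:" || PySem.Str.startswith stripped "Scenario Outline:" then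
        count + 1
      else count) 0

-- the body of _parse_scenarios' for-loop (state: scenarios, current, in_scenario)
def pyParseStep (st : List String × List String × Bool) (line : String) : List String × List String × Bool :=
  let stripped := PySem.Str.strip line
  if PySem.Str.startswith stripped "Scenario:" || PySem.Str.startswith stripped "Scenario Outline:" then
    ((if !st.2.1.isEmpty && st.2.2 then st.1 ++ [PySem.Str.join "\n" st.2.1] else st.1), [line], true)
  else if st.2.2 then (st.1, st.2.1 ++ [line], st.2.2)
  else st

-- _parse_scenarios
def pyParseScenarios (feature_content : String) : List String :=
  let st := (PySem.Str.splitlines feature_content).foldl pyParseStep ([], [], false)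
  if !st.2.1.isEmpty && st.2.2 then st.1 ++ [PySem.Str.join "\n" st.2.1] else st.1

def generate_summary_md_py (feature_name : String) (feature_content : String) (assumptions : List (List (String × String))) (stack : List (String × String)) : String :=
  let scenario_count := pyCountScenarios feature_content
  let lines : List String := [
    "# Feature Spec Summary: " ++ feature_name,
    "",
    "**Stack:** " ++ (PySem.Dict.mk stack).getD "stack" "generic",
    "**BDD Runner:** " ++ (match (PySem.Dict.mk stack).get? "bdd_runner" with
      | some v => if v == "" then "N/A" else v        -- `or 'N/A'`: a str is falsy iff empty
      | none => "N/A"),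
    "**Scenarios:** " ++ PySem.Int.toStr scenario_count,
    "**Assumptions:** " ++ PySem.Int.toStr (assumptions.length : Int),
    "",
    "## Scenarios",
    ""]
  -- `scenario_text.strip().splitlines()[0].strip()`: `[0]` rendered as headD — the split list
  -- is never empty at this call site (every block's stripped text is nonempty)
  let lines := (pyParseScenarios feature_content).foldl
    (fun ls t => ls ++ ["- " ++ PySem.Str.strip ((PySem.Str.splitlines (PySem.Str.strip t)).headD "")]) lines
  let lines := if !assumptions.isEmpty then
      assumptions.foldl
        (fun ls a => ls ++ ["- **" ++ (PySem.Dict.mk a).getD "id" "?" ++ "**: " ++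
          (match (PySem.Dict.mk a).get? "text" with
            | some t => if t == "" then (PySem.Dict.mk a).getD "description" "" else t
            | none => (PySem.Dict.mk a).getD "description" "")])
        (lines ++ ["", "## Assumptions", ""])
    else lines
  PySem.Str.join "\n" (lines ++ [""])

-- ===== PORT B =====
def generate_summary_md_py_alt (feature_name : String) (feature_content : String) (assumptions : List (List (String × String))) (stack : List (String × String)) : String :=
  let titles := (PySem.Str.splitlines feature_content).foldl
    (fun ts line =>
      let stripped := PySem.Str.strip line
      if PySem.Str.startswith stripped "Scenario:" || PySem.Str.startswith stripped "Scenario Outline:" then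
        ts ++ [stripped]
      else ts) []
  let parts : List String := [
    "# Feature Spec Summary: " ++ feature_name,
    "",
    "**Stack:** " ++ (PySem.Dict.mk stack).getD "stack" "generic",
    "**BDD Runner:** " ++ (match (PySem.Dict.mk stack).get? "bdd_runner" with
      | some v => if v == "" then "N/A" else v
      | none => "N/A"),
    "**Scenarios:** " ++ PySem.Int.toStr (titles.length : Int),
    "**Assumptions:** " ++ PySem.Int.toStr (assumptions.length : Int),
    "",
    "## Scenarios",
    ""] ++ titles.map (fun t => "- " ++ t)
  let parts := if !assumptions.isEmpty then
      parts ++ ["", "## Assumptions", ""] ++ assumptions.map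
        (fun a => "- **" ++ (PySem.Dict.mk a).getD "id" "?" ++ "**: " ++
          (match (PySem.Dict.mk a).get? "text" with
            | some t => if t == "" then (PySem.Dict.mk a).getD "description" "" else t
            | none => (PySem.Dict.mk a).getD "description" ""))
    else parts
  PySem.Str.join "\n" (parts ++ [""])

-- ===== PRECONDITION & SPEC =====
def Spec_generate_summary_md_py (feature_name : String) (feature_content : String) (assumptions : List (List (String × String))) (stack : List (String × String)) (out : String) : Prop := out = generate_summary_md_py_alt feature_name feature_content assumptions stack
instance (feature_name : String) (feature_content : String) (assumptions : List (List (String × String))) (stack : List (String × String)) (out : String) : Decidable (Spec_generate_summary_md_py feature_name feature_content assumptions stack out) := by unfold Spec_generate_summary_md_py; infer_instance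

-- ===== CLAIM (what is proved, stated in full; the proofs are below) =====
def Claim_equal_generate_summary_md_py : Prop := ∀ (feature_name : String) (feature_content : String) (assumptions : List (List (String × String))) (stack : List (String × String)), Dom_generate_summary_md_py feature_name feature_content assumptions stack → Spec_generate_summary_md_py feature_name feature_content assumptions stack (generate_summary_md_py feature_name feature_content assumptions stack)

-- ===== LEMMAS AND PROOFS =====

-- Python's line-break predicate inside splitlines (definitionally the one splitlines uses)
def pvIsB (c : Char) : Bool :=
  decide (c.toNat = 10) || decide (c.toNat = 13) || decide (c.toNat = 11) || decide (c.toNat = 12) ||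
    decide (c.toNat = 28) || decide (c.toNat = 29) || decide (c.toNat = 30) || decide (c.toNat = 133) ||
    decide (c.toNat = 8232) || decide (c.toNat = 8233)

-- accumulator-free rendering of splitlines.go
def pvSplit : List Char → List Char → List (List Char)
  | [], cur => if cur.isEmpty then [] else [cur.reverse]
  | c :: rest, cur =>
    if pvIsB c then
      cur.reverse :: pvSplit (if c = '\r' && rest.head? == some '\n' then rest.tail else rest) []
    else pvSplit rest (c :: cur)
termination_by s _ => s.length
decreasing_by
  · simp only [List.length_cons]
    split <;> simp [List.length_tail]
  · simp

def pvClean (cs : List Char) : Prop := ∀ c ∈ cs, pvIsB c = false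

-- the predicate both loops test
def pvCond (line : String) : Bool :=
  PySem.Str.startswith (PySem.Str.strip line) "Scenario:" || PySem.Str.startswith (PySem.Str.strip line) "Scenario Outline:"

-- first_line extraction of port A
def pvFL (t : String) : String :=
  PySem.Str.strip ((PySem.Str.splitlines (PySem.Str.strip t)).headD "")

lemma pv_splitlines_eq (cs : List Char) :
    PySem.Chars.splitlines cs = PySem.Chars.splitlines.go pvIsB cs [] [] := rfl

lemma pv_go_spec (isB : Char → Bool) (s cur : List Char) (acc : List (List Char)) (h : isB = pvIsB) :
    PySem.Chars.splitlines.go isB s cur acc = acc.reverse ++ pvSplit s cur := by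
  subst h
  fun_induction PySem.Chars.splitlines.go pvIsB s cur acc with
  | case1 cur acc h => simp [pvSplit, List.isEmpty_iff.mp h]
  | case2 cur acc h => simp [pvSplit, h]
  | case3 rest cur acc ih =>
      rw [ih]; simp [pvSplit, pvIsB]
  | case4 c rest cur acc hB hne ih =>
      rw [ih, pvSplit, if_pos hne, if_neg]
      · simp
      · intro hcontra
        rw [Bool.and_eq_true, decide_eq_true_iff, beq_iff_eq] at hcontra
        obtain ⟨hc, hh⟩ := hcontra
        cases rest with
        | nil => simp at hh
        | cons r rs => simp at hh; exact hB rs hc (by rw [hh])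
  | case5 c rest cur acc h1 h2 ih =>
      rw [ih, pvSplit, if_neg (by simp [h2])]

lemma pv_splitlines_spec (cs : List Char) : PySem.Chars.splitlines cs = pvSplit cs [] := by
  rw [pv_splitlines_eq, pv_go_spec _ _ _ _ rfl]; simp

lemma pv_split_clean_prefix (u : List Char) (hu : pvClean u) :
    ∀ s cur, pvSplit (u ++ s) cur = pvSplit s (u.reverse ++ cur) := by
  induction u with
  | nil => simp
  | cons c u' ih =>
      intro s cur
      have hc : pvIsB c = false := hu c (by simp)
      have hu' : pvClean u' := fun d hd => hu d (by simp [hd])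
      rw [List.cons_append, pvSplit, if_neg (by simp [hc]), ih hu']
      simp

lemma pv_split_clean (s : List Char) (hs : pvClean s) (hne : s ≠ []) :
    pvSplit s [] = [s] := by
  have := pv_split_clean_prefix s hs [] []
  simp [pvSplit, hne] at this
  simpa using this

lemma pv_split_head (u : List Char) (hu : pvClean u) (T : List Char) :
    pvSplit (u ++ '\n' :: T) [] = u :: pvSplit T [] := by
  rw [pv_split_clean_prefix u hu, pvSplit, if_pos (by decide), if_neg (by simp)]
  simp

lemma pv_split_mem_clean (s cur : List Char) (hcur : pvClean cur) :
    ∀ l ∈ pvSplit s cur, pvClean l := by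
  fun_induction pvSplit s cur with
  | case1 cur h => simp
  | case2 cur h =>
      intro l hl; simp at hl; subst hl
      intro c hc; exact hcur c (by simpa using hc)
  | case3 c rest cur hB ih =>
      intro l hl
      rcases List.mem_cons.mp hl with rfl | hl
      · intro d hd; exact hcur d (by simpa using hd)
      · exact ih (by intro d hd; simp at hd) l hl
  | case4 c rest cur hB ih =>
      intro l hl
      refine ih ?_ l hl
      intro d hd
      rcases List.mem_cons.mp hd with rfl | hd
      · exact Bool.not_eq_true _ ▸ Bool.of_not_eq_true hB
      · exact hcur d hd

lemma pv_splitlines_mem_clean (s : String) (l : String) (hl : l ∈ PySem.Str.splitlines s) :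
    pvClean l.toList := by
  have : l.toList ∈ List.map String.toList (PySem.Str.splitlines s) := List.mem_map_of_mem hl
  rw [PySem.Str.splitlines_map_toList, pv_splitlines_spec] at this
  exact pv_split_mem_clean _ [] (by intro c hc; simp at hc) _ this

-- whitespace facts
lemma pv_clean_lstrip (x : List Char) (h : pvClean x) : pvClean (PySem.Chars.lstrip x) :=
  fun c hc => h c ((List.dropWhile_sublist _).subset hc)

lemma pv_clean_rstrip (x : List Char) (h : pvClean x) : pvClean (PySem.Chars.rstrip x) := by
  intro c hc
  simp only [PySem.Chars.rstrip, List.mem_reverse] at hc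
  exact h c (by simpa using (List.dropWhile_sublist _).subset hc)

lemma pv_clean_strip (x : List Char) (h : pvClean x) : pvClean (PySem.Chars.strip x) :=
  pv_clean_rstrip _ (pv_clean_lstrip _ h)

lemma pv_lstrip_idem (x : List Char) : PySem.Chars.lstrip (PySem.Chars.lstrip x) = PySem.Chars.lstrip x := by
  simp [PySem.Chars.lstrip, List.dropWhile_idempotent]

lemma pv_rstrip_idem (x : List Char) : PySem.Chars.rstrip (PySem.Chars.rstrip x) = PySem.Chars.rstrip x := by
  simp [PySem.Chars.rstrip, List.dropWhile_idempotent]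

lemma pv_head_lstrip (x : List Char) (a : Char) (l : List Char)
    (h : PySem.Chars.lstrip x = a :: l) : PySem.Chars.isspace a = false := by
  simp only [PySem.Chars.lstrip] at h
  have := List.head_dropWhile_not PySem.Chars.isspace (l := x) (by simp [h])
  simp only [h] at this; simpa using this

lemma pv_lstrip_of_head (a : Char) (l : List Char) (h : PySem.Chars.isspace a = false) :
    PySem.Chars.lstrip (a :: l) = a :: l := by
  simp [PySem.Chars.lstrip, h]

lemma pv_lstrip_rstrip (x : List Char) :
    PySem.Chars.lstrip (PySem.Chars.rstrip (PySem.Chars.lstrip x)) = PySem.Chars.rstrip (PySem.Chars.lstrip x) := by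
  cases h : PySem.Chars.rstrip (PySem.Chars.lstrip x) with
  | nil => simp [PySem.Chars.lstrip]
  | cons a l =>
      have hpre : PySem.Chars.lstrip x = PySem.Chars.rstrip (PySem.Chars.lstrip x) ++ (List.takeWhile PySem.Chars.isspace (PySem.Chars.lstrip x).reverse).reverse := by
        simp [PySem.Chars.rstrip]
        rw [← List.reverse_append, List.takeWhile_append_dropWhile, List.reverse_reverse]
      rw [h] at hpre
      have ha : PySem.Chars.isspace a = false := pv_head_lstrip x a _ hpre
      rw [pv_lstrip_of_head a l ha]

lemma pv_strip_idem (x : List Char) : PySem.Chars.strip (PySem.Chars.strip x) = PySem.Chars.strip x := by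
  simp [PySem.Chars.strip]
  rw [pv_lstrip_rstrip, pv_rstrip_idem]

lemma pv_lstrip_append (u v : List Char) (h : PySem.Chars.lstrip u ≠ []) :
    PySem.Chars.lstrip (u ++ v) = PySem.Chars.lstrip u ++ v := by
  simp only [PySem.Chars.lstrip] at *
  rw [List.dropWhile_append, if_neg (by simpa using h)]

lemma pv_rstrip_append (u v : List Char) :
    PySem.Chars.rstrip (u ++ v) = if PySem.Chars.rstrip v = [] then PySem.Chars.rstrip u else u ++ PySem.Chars.rstrip v := by
  simp only [PySem.Chars.rstrip, List.reverse_append]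
  rw [List.dropWhile_append]
  have hiff : (List.dropWhile PySem.Chars.isspace v.reverse).isEmpty = true ↔ (List.dropWhile PySem.Chars.isspace v.reverse).reverse = [] := by
    simp [List.isEmpty_iff]
  split
  · rename_i hh
    rw [if_pos (hiff.mp hh)]
  · rename_i hh
    rw [if_neg (fun hc => hh (hiff.mpr hc))]
    simp

lemma pv_rstrip_lstrip_ne (x : List Char) (h : PySem.Chars.lstrip x ≠ []) :
    PySem.Chars.rstrip (PySem.Chars.lstrip x) ≠ [] := by
  cases hx : PySem.Chars.lstrip x with
  | nil => exact absurd hx h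
  | cons a l =>
      have ha : PySem.Chars.isspace a = false := pv_head_lstrip x a l hx
      intro hc
      simp only [PySem.Chars.rstrip, List.reverse_eq_nil_iff, List.dropWhile_eq_nil_iff] at hc
      have := hc a (by simp)
      rw [ha] at this; cases this

lemma pv_rstrip_prefix (x : List Char) :
    x = PySem.Chars.rstrip x ++ (List.takeWhile PySem.Chars.isspace x.reverse).reverse := by
  simp [PySem.Chars.rstrip]
  rw [← List.reverse_append, List.takeWhile_append_dropWhile, List.reverse_reverse]

lemma pv_rstrip_cons_ne (c : Char) (T : List Char) (h : PySem.Chars.rstrip (c :: T) ≠ []) :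
    ∃ T', PySem.Chars.rstrip (c :: T) = c :: T' := by
  cases hr : PySem.Chars.rstrip (c :: T) with
  | nil => exact absurd hr h
  | cons d T' =>
      have hp := pv_rstrip_prefix (c :: T)
      rw [hr] at hp
      simp at hp
      obtain ⟨h1, h2⟩ := hp
      subst h1
      exact ⟨T', rfl⟩

-- the core head-line lemma, Chars level
lemma pv_core (u T : List Char) (hu : pvClean u) (hne : PySem.Chars.lstrip u ≠ []) :
    PySem.Chars.strip ((pvSplit (PySem.Chars.strip (u ++ '\n' :: T)) []).headD []) = PySem.Chars.strip u := by
  have hsu : PySem.Chars.strip u ≠ [] := pv_rstrip_lstrip_ne u hne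
  have hstep : PySem.Chars.strip (u ++ '\n' :: T) = PySem.Chars.rstrip (PySem.Chars.lstrip u ++ '\n' :: T) := by
    simp only [PySem.Chars.strip]
    rw [pv_lstrip_append u _ hne]
  rw [hstep, pv_rstrip_append]
  split
  · -- the tail is all whitespace: the stripped text is exactly strip u
    rw [show PySem.Chars.rstrip (PySem.Chars.lstrip u) = PySem.Chars.strip u from rfl]
    rw [pv_split_clean _ (pv_clean_strip _ hu) hsu]
    simp [pv_strip_idem]
  · -- the newline after the header survives: the first line is lstrip u
    rename_i hr
    obtain ⟨T', hT'⟩ := pv_rstrip_cons_ne _ _ hr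
    rw [hT', pv_split_head _ (pv_clean_lstrip _ hu)]
    simp only [List.headD_cons]
    show PySem.Chars.rstrip (PySem.Chars.lstrip (PySem.Chars.lstrip u)) = _
    rw [pv_lstrip_idem]
    rfl

-- pvFL through toList
lemma pv_fl_toList (t : String) :
    (pvFL t).toList = PySem.Chars.strip ((pvSplit (PySem.Chars.strip t.toList) []).headD []) := by
  simp only [pvFL, PySem.Str.toList_strip]
  refine congrArg PySem.Chars.strip ?_
  have h1 : List.map String.toList (PySem.Str.splitlines (PySem.Str.strip t))
      = pvSplit (PySem.Chars.strip t.toList) [] := by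
    rw [PySem.Str.splitlines_map_toList, PySem.Str.toList_strip, pv_splitlines_spec]
  rw [← h1]
  cases PySem.Str.splitlines (PySem.Str.strip t) with
  | nil => rfl
  | cons a l => simp

lemma pv_cond_strip_ne (h : String) (hc : pvCond h = true) : PySem.Chars.strip h.toList ≠ [] := by
  simp only [pvCond, Bool.or_eq_true, PySem.Str.startswith_eq, PySem.Str.toList_strip,
    PySem.Chars.startswith_iff] at hc
  intro hnil
  rw [hnil] at hc
  rcases hc with hpre | hpre
  · exact absurd hpre (by decide)
  · exact absurd hpre (by decide)

-- per-block: the first line of a joined block is the stripped header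
lemma pv_block (h : String) (rest : List String)
    (hcl : ∀ l ∈ h :: rest, pvClean l.toList) (hc : pvCond h = true) :
    pvFL (PySem.Str.join "\n" (h :: rest)) = PySem.Str.strip h := by
  have hJ : (PySem.Str.join "\n" (h :: rest)).toList
      = PySem.Chars.join ['\n'] (h.toList :: rest.map String.toList) := by
    simp [PySem.Str.join]
  apply String.toList_injective
  rw [pv_fl_toList, PySem.Str.toList_strip, hJ]
  cases rest with
  | nil =>
      simp only [List.map_nil]
      rw [PySem.Chars.join_singleton, pv_split_clean _ (pv_clean_strip _ (hcl h (by simp)))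
        (pv_cond_strip_ne h hc)]
      simp [pv_strip_idem]
  | cons r rs =>
      rw [show List.map String.toList (r :: rs) = r.toList :: rs.map String.toList from rfl,
        PySem.Chars.join_cons_cons]
      rw [List.append_assoc]
      apply pv_core _ _ (hcl h (by simp))
      intro hnil
      exact pv_cond_strip_ne h hc (by simp only [PySem.Chars.strip, hnil]; rfl)

-- flush and the ghost of the current block
def pvFlush (st : List String × List String × Bool) : List String :=
  if !st.2.1.isEmpty && st.2.2 then st.1 ++ [PySem.Str.join "\n" st.2.1] else st.1

def pvG (cur : List String) (ins : Bool) : List String :=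
  if !cur.isEmpty && ins then [PySem.Str.strip (cur.headD "")] else []

lemma pv_flush_map (sc cur : List String) (ins : Bool)
    (hcur : ∀ l ∈ cur, pvClean l.toList)
    (hinv : (ins = true → ∃ h rest, cur = h :: rest ∧ pvCond h = true) ∧ (ins = false → cur = [])) :
    (pvFlush (sc, cur, ins)).map pvFL = sc.map pvFL ++ pvG cur ins := by
  cases ins with
  | false =>
      have := hinv.2 rfl; subst this
      simp [pvFlush, pvG]
  | true =>
      obtain ⟨h, rest, rfl, hch⟩ := hinv.1 rfl
      simp only [pvFlush, pvG, List.isEmpty_cons, Bool.not_false, Bool.and_self]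
      simp [pv_block h rest hcur hch]

lemma pv_parse_loop (Lr : List String) (sc cur : List String) (ins : Bool)
    (hL : ∀ l ∈ Lr, pvClean l.toList)
    (hcur : ∀ l ∈ cur, pvClean l.toList)
    (hinv : (ins = true → ∃ h rest, cur = h :: rest ∧ pvCond h = true) ∧ (ins = false → cur = [])) :
    (pvFlush (Lr.foldl pyParseStep (sc, cur, ins))).map pvFL
      = sc.map pvFL ++ pvG cur ins ++ (Lr.filter pvCond).map PySem.Str.strip := by
  induction Lr generalizing sc cur ins with
  | nil => simpa using pv_flush_map sc cur ins hcur hinv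
  | cons l Lr' ih =>
      have hstep : pyParseStep (sc, cur, ins) l
          = if pvCond l then (pvFlush (sc, cur, ins), [l], true)
            else if ins then (sc, cur ++ [l], ins) else (sc, cur, ins) := rfl
      rw [List.foldl_cons, hstep]
      have hLl : pvClean l.toList := hL l (by simp)
      have hL' : ∀ x ∈ Lr', pvClean x.toList := fun x hx => hL x (by simp [hx])
      by_cases hc : pvCond l = true
      · rw [if_pos hc]
        rw [ih (pvFlush (sc, cur, ins)) [l] true hL'
          (by intro x hx; simp at hx; subst hx; exact hLl)
          ⟨fun _ => ⟨l, [], rfl, hc⟩, fun hco => Bool.noConfusion hco⟩]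
        rw [pv_flush_map sc cur ins hcur hinv]
        rw [List.filter_cons_of_pos hc]
        simp [pvG, List.append_assoc]
      · rw [if_neg hc, List.filter_cons_of_neg (by simpa using hc)]
        cases ins with
        | true =>
            obtain ⟨h, rest, rfl, hch⟩ := hinv.1 rfl
            rw [if_pos rfl]
            rw [ih sc ((h :: rest) ++ [l]) true hL'
              (by intro x hx; rcases List.mem_append.mp hx with hx | hx
                  · exact hcur x hx
                  · simp at hx; subst hx; exact hLl)
              ⟨fun _ => ⟨h, rest ++ [l], by simp, hch⟩, fun hco => Bool.noConfusion hco⟩]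
            simp [pvG]
        | false =>
            have := hinv.2 rfl; subst this
            rw [if_neg (by simp)]
            rw [ih sc [] false hL' hcur hinv]

lemma pv_parse_fl (fc : String) :
    (pyParseScenarios fc).map pvFL
      = ((PySem.Str.splitlines fc).filter pvCond).map PySem.Str.strip := by
  have : pyParseScenarios fc
      = pvFlush ((PySem.Str.splitlines fc).foldl pyParseStep ([], [], false)) := rfl
  rw [this, pv_parse_loop (PySem.Str.splitlines fc) [] [] false (fun l hl => pv_splitlines_mem_clean fc l hl)
    (by intro x hx; cases hx)
    ⟨fun hco => Bool.noConfusion hco, fun _ => rfl⟩]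
  simp [pvG]

lemma pv_count (fc : String) :
    pyCountScenarios fc = ((((PySem.Str.splitlines fc).filter pvCond).map PySem.Str.strip).length : Int) := by
  have hfun : (fun (count : Int) (line : String) =>
      let stripped := PySem.Str.strip line
      if PySem.Str.startswith stripped "Scenario:" || PySem.Str.startswith stripped "Scenario Outline:" then
        count + 1
      else count)
      = (fun (count : Int) (line : String) => if pvCond line then count + 1 else count) := rfl
  rw [pyCountScenarios, hfun, PySem.List.foldl_count_if]
  simp [List.countP_eq_length_filter]

-- ===== VERDICT (by name: the statement is the Claim_ definition above) =====
theorem generate_summary_md_py_spec : Claim_equal_generate_summary_md_py := by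
  intro feature_name feature_content assumptions stack _
  unfold Spec_generate_summary_md_py generate_summary_md_py generate_summary_md_py_alt
  have htitles : ((PySem.Str.splitlines feature_content).foldl
      (fun ts line =>
        let stripped := PySem.Str.strip line
        if PySem.Str.startswith stripped "Scenario:" || PySem.Str.startswith stripped "Scenario Outline:" then
          ts ++ [stripped]
        else ts) ([] : List String))
      = ((PySem.Str.splitlines feature_content).filter pvCond).map PySem.Str.strip := by
    have hfun : (fun (ts : List String) (line : String) =>
        let stripped := PySem.Str.strip line
        if PySem.Str.startswith stripped "Scenario:" || PySem.Str.startswith stripped "Scenario Outline:" then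
          ts ++ [stripped]
        else ts)
        = (fun (ts : List String) (line : String) => if pvCond line then ts ++ [PySem.Str.strip line] else ts) := rfl
    rw [hfun, PySem.List.foldl_append_if]
    simp
  have hbullets : (fun (ls : List String) (t : String) =>
      ls ++ ["- " ++ PySem.Str.strip ((PySem.Str.splitlines (PySem.Str.strip t)).headD "")])
      = (fun (ls : List String) (t : String) => ls ++ [("- " ++ pvFL t)]) := rfl
  simp only [htitles, hbullets, PySem.List.foldl_append_singleton_eq_map, pv_count]
  rw [show List.map (fun t => "- " ++ pvFL t) (pyParseScenarios feature_content)
      = List.map (fun t => "- " ++ t) (List.map pvFL (pyParseScenarios feature_content)) from by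
    rw [List.map_map]; rfl]
  rw [pv_parse_fl]
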